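-- pv_equiv track=rewrite | github.com/HippolyteKarakostas/steerlab_tt | src/steerlab_tt/suggestion.py | get_all_possible_choices
-- ===== SOURCE A (Python) =====
-- def get_all_possible_choices(trigrams_request: list[str], sequences_by_trigram: dict[str, set]) -> set:
--     """Retourne l’ensemble des séquences qui contiennent tous les trigrammes requis.
--
--     Args:
--         trigrams_request: Trigrammes de la requête (éventuellement vide).
--         sequences_by_trigram: Mapping {trigramme: {ensemble de séquences qui le contiennent}}.
--
--     Returns:
--         set[str]: Séquences candidates (intersection des ensembles).
--     """
--     if not trigrams_request:
--         return set()
--     trigrams = sorted(trigrams_request, key=lambda trigram: len(sequences_by_trigram.get(trigram, set())))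
--     all_possible_choices = sequences_by_trigram.get(trigrams[0], set()).copy()
--     for trigram in trigrams[1:]:
--         if not all_possible_choices:
--             break
--         all_possible_choices &= sequences_by_trigram.get(trigram, set())
--     return all_possible_choices
-- ===== SOURCE B (Python) =====
-- def get_all_possible_choices(trigrams_request: list[str], sequences_by_trigram: dict[str, set]) -> set:
--     if not trigrams_request:
--         return set()
--     base = min(trigrams_request,
--                key=lambda trigram: len(sequences_by_trigram.get(trigram, set())))
--     base_set = sequences_by_trigram.get(base, set())
--     return {seq for seq in base_set
--             if all(seq in sequences_by_trigram.get(trigram, set())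
--                    for trigram in trigrams_request)}
-- ===== Notes on version B (the rewrite author's own statement) =====
-- stated objective: simpler
-- what changed: Replaces the sort-by-set-size plus iterated destructive set intersections with a single min() to pick the smallest candidate set and one filtering set-comprehension testing membership in every requested trigram's set.
import Mathlib
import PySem

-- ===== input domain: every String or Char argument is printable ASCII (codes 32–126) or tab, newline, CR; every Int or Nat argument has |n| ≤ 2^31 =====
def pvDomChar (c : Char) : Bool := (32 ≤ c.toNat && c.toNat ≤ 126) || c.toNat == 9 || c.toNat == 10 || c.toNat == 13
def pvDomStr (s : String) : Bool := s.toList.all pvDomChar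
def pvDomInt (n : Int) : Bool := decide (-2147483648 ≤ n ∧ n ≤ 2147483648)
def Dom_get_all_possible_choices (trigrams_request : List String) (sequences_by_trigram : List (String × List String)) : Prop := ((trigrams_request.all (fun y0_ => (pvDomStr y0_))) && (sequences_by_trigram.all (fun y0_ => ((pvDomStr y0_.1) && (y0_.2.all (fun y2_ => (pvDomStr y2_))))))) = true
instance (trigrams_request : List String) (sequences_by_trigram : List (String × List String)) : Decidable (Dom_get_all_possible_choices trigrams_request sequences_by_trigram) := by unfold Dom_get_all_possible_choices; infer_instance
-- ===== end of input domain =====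

-- B replaces A's sort-by-set-size + iterated set intersections with min() + one membership filter pass (objective: simpler).

-- ===== PORT A =====
-- 'for trigram in trigrams[1:]: if not acc: break; acc &= d.get(trigram, set())'
def pvLoopA_get_all_possible_choices (sequences_by_trigram : PySem.Dict String (List String)) :
    List String → List String → List String
  | acc, [] => acc
  | acc, trigram :: rest =>
      if acc = [] then acc
      else pvLoopA_get_all_possible_choices sequences_by_trigram
        (PySem.Set.inter acc (PySem.Dict.getD sequences_by_trigram trigram [])) rest

def get_all_possible_choices (trigrams_request : List String) (sequences_by_trigram : List (String × List String)) : List String :=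
  if trigrams_request = [] then []
  else
    let d := PySem.Dict.mk sequences_by_trigram
    let trigrams := PySem.List.sorted trigrams_request
      (fun trigram => PySem.Set.len (PySem.Dict.getD d trigram [])) false
    -- '.copy()' is identity on the modelled value
    let all_possible_choices := PySem.Dict.getD d (PySem.List.pyGetD trigrams 0 "") []
    pvLoopA_get_all_possible_choices d all_possible_choices (PySem.List.slice trigrams (some 1))

-- ===== PORT B =====
def get_all_possible_choices_alt (trigrams_request : List String) (sequences_by_trigram : List (String × List String)) : List String :=
  if trigrams_request = [] then []
  else
    let d := PySem.Dict.mk sequences_by_trigram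
    let base := PySem.List.minD trigrams_request
      (fun trigram => PySem.Set.len (PySem.Dict.getD d trigram [])) ""
    let base_set := PySem.Dict.getD d base []
    -- the set comprehension over the (distinct-element) set base_set
    base_set.filter (fun seq =>
      trigrams_request.all (fun trigram =>
        PySem.Set.contains (PySem.Dict.getD d trigram []) seq))

-- ===== PRECONDITION & SPEC =====
def Spec_get_all_possible_choices (trigrams_request : List String) (sequences_by_trigram : List (String × List String)) (out : List String) : Prop := out = get_all_possible_choices_alt trigrams_request sequences_by_trigram
instance (trigrams_request : List String) (sequences_by_trigram : List (String × List String)) (out : List String) : Decidable (Spec_get_all_possible_choices trigrams_request sequences_by_trigram out) := by unfold Spec_get_all_possible_choices; infer_instance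

-- ===== CLAIM (what is proved, stated in full; the proofs are below) =====
def Claim_equal_get_all_possible_choices : Prop := ∀ (trigrams_request : List String) (sequences_by_trigram : List (String × List String)), Dom_get_all_possible_choices trigrams_request sequences_by_trigram → Spec_get_all_possible_choices trigrams_request sequences_by_trigram (get_all_possible_choices trigrams_request sequences_by_trigram)

-- ===== LEMMAS AND PROOFS =====

-- A's intersection loop (with its break) is one filter by membership-in-every-listed-set.
theorem pvLoopA_eq_filter (d : PySem.Dict String (List String)) (ts : List String) :
    ∀ acc : List String,
      pvLoopA_get_all_possible_choices d acc ts =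
        acc.filter (fun x => ts.all (fun t => PySem.Set.contains (PySem.Dict.getD d t []) x)) := by
  induction ts with
  | nil => intro acc; simp [pvLoopA_get_all_possible_choices]
  | cons t ts ih =>
    intro acc
    by_cases h : acc = []
    · subst h; simp [pvLoopA_get_all_possible_choices]
    · rw [pvLoopA_get_all_possible_choices, if_neg h, ih, PySem.Set.inter,
        List.filter_filter]
      apply List.filter_congr
      intro x _
      simp [List.all_cons, Bool.and_comm]

-- the running 'if key x < key m then x else m' fold, lifted through 'some'
theorem pvMinFold_some {α κ : Type} [LT κ] [DecidableLT κ] (key : α → κ) (xs : List α) :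
    ∀ m : α,
      xs.foldl (fun acc x =>
          match acc with
          | none => some x
          | some m => if key x < key m then some x else some m) (some m) =
        some (xs.foldl (fun m x => if key x < key m then x else m) m) := by
  induction xs with
  | nil => intro m; rfl
  | cons x xs ih =>
    intro m
    simp only [List.foldl_cons]
    by_cases h : key x < key m <;> simp [h, ih]

-- the head of the stable insertion sort is the running minimum
theorem pvHead_foldl_insertBy {α κ : Type} [LT κ] [DecidableLT κ] (key : α → κ)
    (xs : List α) :
    ∀ (y : α) (ys : List α),
      ((xs.foldl (fun acc x => PySem.List.insertBy (fun a b => decide (key a < key b)) x acc) (y :: ys))).head? =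
        some (xs.foldl (fun m x => if key x < key m then x else m) y) := by
  induction xs with
  | nil => intro y ys; rfl
  | cons x xs ih =>
    intro y ys
    simp only [List.foldl_cons, PySem.List.insertBy]
    by_cases h : key x < key y <;> simp [h, ih]

theorem pvHead_sorted_eq_min? {α κ : Type} [LT κ] [DecidableLT κ] (key : α → κ)
    (xs : List α) (hxs : xs ≠ []) :
    (PySem.List.sorted xs key false).head? = PySem.List.min? xs key := by
  obtain ⟨x, rest, rfl⟩ := List.exists_cons_of_ne_nil hxs
  rw [PySem.List.sorted, PySem.List.min?]
  simp only [List.foldl_cons, Bool.false_eq_true, if_false]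
  have h0 : PySem.List.insertBy (fun a b => decide (key a < key b)) x [] = [x] := rfl
  rw [h0, pvHead_foldl_insertBy key rest x []]
  exact (pvMinFold_some key rest x).symm

-- ===== VERDICT (by name: the statement is the Claim_ definition above) =====
theorem get_all_possible_choices_spec : Claim_equal_get_all_possible_choices := by
  intro req d _
  unfold Spec_get_all_possible_choices get_all_possible_choices get_all_possible_choices_alt
  by_cases hreq : req = []
  · simp [hreq]
  · simp only [if_neg hreq]
    set dd := PySem.Dict.mk d with hdd
    set key := fun trigram => PySem.Set.len (PySem.Dict.getD dd trigram []) with hkey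
    have hs : PySem.List.sorted req key false ≠ [] := by
      simp [PySem.List.sorted_eq_nil_iff, hreq]
    obtain ⟨m, rest, hmr⟩ := List.exists_cons_of_ne_nil hs
    have hmin : PySem.List.minD req key "" = m := by
      have := pvHead_sorted_eq_min? key req hreq
      rw [hmr] at this
      rw [PySem.List.minD, ← this]
      rfl
    have hperm : (m :: rest).Perm req := hmr ▸ PySem.List.sorted_perm req key false
    rw [hmr, hmin, PySem.List.slice_from _ (by norm_num), pvLoopA_eq_filter]
    simp only [PySem.List.pyGetD_zero_cons, Int.toNat_one, List.drop_succ_cons, List.drop_zero]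
    apply List.filter_congr
    intro x hx
    rw [← List.Perm.all_eq hperm, List.all_cons]
    simp [PySem.Set.contains]
    exact fun _ => hx
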